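-- pv_equiv track=rewrite | github.com/VictorGSants/AvmProject | backend/main.py | gerar_header_dinamico
-- ===== SOURCE A (Python) =====
-- def get_meses_nomes():
--     return ["Jan", "Fev", "Mar", "Abr", "Mai", "Jun", "Jul", "Ago", "Set", "Out", "Nov", "Dez"]
--
-- def gerar_header_dinamico(mes_inicio):
--     """Cria a lista de meses começando pelo mês de início do contrato."""
--     nomes_base = get_meses_nomes()
--     header_nomes = []
--     header_nums = []
--     for i in range(12):
--         idx = (mes_inicio - 1 + i) % 12
--         header_nomes.append(nomes_base[idx])
--         header_nums.append(idx + 1)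
--     return header_nomes, header_nums
-- ===== SOURCE B (Python) =====
-- def get_meses_nomes():
--     return ["Jan", "Fev", "Mar", "Abr", "Mai", "Jun", "Jul", "Ago", "Set", "Out", "Nov", "Dez"]
--
-- def gerar_header_dinamico(mes_inicio):
--     """Cria a lista de meses começando pelo mês de início do contrato."""
--     nomes_base = get_meses_nomes()
--     start = (mes_inicio - 1) % 12
--     header_nomes = nomes_base[start:] + nomes_base[:start]
--     header_nums = list(range(start + 1, 13)) + list(range(1, start + 1))
--     return header_nomes, header_nums
-- ===== Notes on version B (the rewrite author's own statement) =====
-- stated objective: simpler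
-- what changed: Replaces the per-index loop with modular arithmetic in each iteration by computing the rotation offset once and building the result as slice concatenations and two range lists.
import Mathlib
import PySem

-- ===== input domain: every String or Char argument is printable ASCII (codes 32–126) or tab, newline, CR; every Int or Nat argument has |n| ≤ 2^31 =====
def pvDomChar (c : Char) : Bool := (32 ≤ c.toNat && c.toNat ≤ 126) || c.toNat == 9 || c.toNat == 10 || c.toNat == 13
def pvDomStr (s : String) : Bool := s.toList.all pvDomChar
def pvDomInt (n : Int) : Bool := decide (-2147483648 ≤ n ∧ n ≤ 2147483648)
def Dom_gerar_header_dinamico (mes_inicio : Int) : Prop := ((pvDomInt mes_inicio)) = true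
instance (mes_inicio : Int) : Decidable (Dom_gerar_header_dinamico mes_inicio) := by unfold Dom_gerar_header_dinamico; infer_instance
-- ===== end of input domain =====

-- B replaces A's per-index loop (one modular index computation per step) by a single
-- start = (mes-1) % 12 plus slice rotation and two range lists (objective: simpler).

-- ===== PORT A =====
def get_meses_nomes : List String :=
  ["Jan", "Fev", "Mar", "Abr", "Mai", "Jun", "Jul", "Ago", "Set", "Out", "Nov", "Dez"]

-- literal port of A's loop: fold over range(12), idx = (mes_inicio - 1 + i) % 12;
-- nomes_base[idx] is always in range (0 ≤ idx < 12), so the pyGet? is total here.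
def gerar_header_dinamico (mes_inicio : Int) : List String × List Int :=
  let nomes_base := get_meses_nomes
  (PySem.List.pyRange 0 12 1).foldl
    (fun (acc : List String × List Int) i =>
      let idx := PySem.Int.mod (mes_inicio - 1 + i) 12
      (acc.1 ++ [(PySem.List.pyGet? nomes_base idx).getD ""], acc.2 ++ [idx + 1]))
    ([], [])

-- ===== PORT B =====
def gerar_header_dinamico_alt (mes_inicio : Int) : List String × List Int :=
  let nomes_base := get_meses_nomes
  let start := PySem.Int.mod (mes_inicio - 1) 12
  (PySem.List.slice nomes_base (some start) none ++ PySem.List.slice nomes_base none (some start),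
   PySem.List.pyRange (start + 1) 13 1 ++ PySem.List.pyRange 1 (start + 1) 1)

-- ===== PRECONDITION & SPEC =====
def Spec_gerar_header_dinamico (mes_inicio : Int) (out : List String × List Int) : Prop := out = gerar_header_dinamico_alt mes_inicio
instance (mes_inicio : Int) (out : List String × List Int) : Decidable (Spec_gerar_header_dinamico mes_inicio out) := by unfold Spec_gerar_header_dinamico; infer_instance

-- ===== CLAIM (what is proved, stated in full; the proofs are below) =====
def Claim_equal_gerar_header_dinamico : Prop := ∀ (mes_inicio : Int), Dom_gerar_header_dinamico mes_inicio → Spec_gerar_header_dinamico mes_inicio (gerar_header_dinamico mes_inicio)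

-- ===== LEMMAS AND PROOFS =====

-- Both ports depend on mes_inicio only through (mes_inicio - 1) % 12: shifting
-- mes_inicio to k + 1 where k = (mes_inicio - 1).emod 12 changes nothing.
theorem gerar_A_shift (mes : Int) :
    gerar_header_dinamico mes = gerar_header_dinamico ((mes - 1) % 12 + 1) := by
  have hc : ∀ i : Int,
      PySem.Int.mod (mes - 1 + i) 12 = PySem.Int.mod ((mes - 1) % 12 + 1 - 1 + i) 12 := by
    intro i
    rw [PySem.Int.mod_eq_emod_of_pos (by omega), PySem.Int.mod_eq_emod_of_pos (by omega),
      show (mes - 1) % 12 + 1 - 1 + i = (mes - 1) % 12 + i from by ring,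
      Int.emod_add_emod]
  simp only [gerar_header_dinamico,
    show PySem.List.pyRange 0 12 1 = [0,1,2,3,4,5,6,7,8,9,10,11] from rfl,
    List.foldl, hc]

theorem gerar_B_shift (mes : Int) :
    gerar_header_dinamico_alt mes = gerar_header_dinamico_alt ((mes - 1) % 12 + 1) := by
  have hc : PySem.Int.mod (mes - 1) 12 = PySem.Int.mod ((mes - 1) % 12 + 1 - 1) 12 := by
    rw [PySem.Int.mod_eq_emod_of_pos (by omega), PySem.Int.mod_eq_emod_of_pos (by omega),
      show (mes - 1) % 12 + 1 - 1 = (mes - 1) % 12 from by ring, Int.emod_emod_of_dvd _ dvd_rfl]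
  simp only [gerar_header_dinamico_alt, hc]

-- ===== VERDICT (by name: the statement is the Claim_ definition above) =====
theorem gerar_header_dinamico_spec : Claim_equal_gerar_header_dinamico := by
  intro mes _
  unfold Spec_gerar_header_dinamico
  rw [gerar_A_shift, gerar_B_shift]
  have h0 : 0 ≤ (mes - 1) % 12 := Int.emod_nonneg _ (by omega)
  have h12 : (mes - 1) % 12 < 12 := Int.emod_lt_of_pos _ (by omega)
  set k := (mes - 1) % 12 with hk
  clear_value k
  interval_cases k <;> decide
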